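-- pv_equiv track=rewrite | github.com/susiegriggo/ProtvecBacterialProteins | scripts/train_protvec.py | split_kmers
-- ===== SOURCE A (Python) =====
-- def split_kmers(seq, k):
--     """Splits a sequence into overlapping kmers"""
--     a, b, c = zip(*[iter(seq)]*k), zip(*[iter(seq[1:])]*k), zip(*[iter(seq[2:])]*k)
--     str_kmers = []
--     for kmers in [a,b,c]:
--         x = []
--         for kmer in kmers:
--             x.append("".join(kmer))
--         str_kmers.append(x)
--     return str_kmers
-- ===== SOURCE B (Python) =====
-- def split_kmers(seq, k):
--     """Splits a sequence into overlapping kmers"""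
--     if k <= 0:
--         return [[], [], []]
--     str_kmers = []
--     for offset in range(3):
--         s = seq[offset:]
--         chunks = []
--         i = 0
--         while i + k <= len(s):
--             chunks.append("".join(s[i:i + k]))
--             i += k
--         str_kmers.append(chunks)
--     return str_kmers
-- ===== Notes on version B (the rewrite author's own statement) =====
-- stated objective: idiomatic
-- what changed: Replaces the zip(*[iter(seq)]*k) iterator-grouper trick (three zipped iterator tuples, then a nested join loop) with a direct index-stepping while loop that slices s[i:i+k] for each of the three offsets; non-positive k naturally yields no k-mers, matching zip's empty result.
import Mathlib
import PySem

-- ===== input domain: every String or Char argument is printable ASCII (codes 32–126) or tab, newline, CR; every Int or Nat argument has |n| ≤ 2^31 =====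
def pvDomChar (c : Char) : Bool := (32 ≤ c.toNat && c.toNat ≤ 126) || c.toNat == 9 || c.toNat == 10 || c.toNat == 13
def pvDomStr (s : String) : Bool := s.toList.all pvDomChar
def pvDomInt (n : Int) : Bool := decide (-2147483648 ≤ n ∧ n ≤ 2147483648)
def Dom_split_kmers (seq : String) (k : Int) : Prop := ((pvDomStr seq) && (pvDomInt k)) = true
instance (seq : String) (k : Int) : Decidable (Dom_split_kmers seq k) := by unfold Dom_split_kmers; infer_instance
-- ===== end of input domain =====

-- B replaces A's zip(*[iter(seq)]*k) grouper idiom with an index-stepping while loop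
-- over slices s[i:i+k] (objective: idiomatic); same return value everywhere.

-- ===== PORT A =====
-- zip(*[iter(x)]*k): consecutive groups of k items, dropping the short final group;
-- for k <= 0 Python's zip() of no iterators is empty, hence the 0 < k condition.
def pyGroups (k : Int) (l : List Char) : List (List Char) :=
  if h : 0 < k ∧ k.toNat ≤ l.length then
    l.take k.toNat :: pyGroups k (l.drop k.toNat)
  else []
termination_by l.length
decreasing_by simp; omega

def split_kmers (seq : String) (k : Int) : List (List String) :=
  let a := pyGroups k seq.toList
  let b := pyGroups k (PySem.List.slice seq.toList (some 1) none)
  let c := pyGroups k (PySem.List.slice seq.toList (some 2) none)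
  [a, b, c].foldl (fun str_kmers kmers =>
    str_kmers ++ [kmers.foldl (fun x kmer => x ++ [String.ofList kmer]) []]) []

-- ===== PORT B =====
-- the while loop 'while i + k <= len(s): chunks.append("".join(s[i:i+k])); i += k';
-- the 0 < k conjunct only makes the recursion total: Python B's 'if k <= 0' guard
-- means the loop is never entered with k <= 0.
def bChunks (s : List Char) (k : Int) (i : Int) (chunks : List String) : List String :=
  if h : 0 < k ∧ i + k ≤ (s.length : Int) then
    bChunks s k (i + k) (chunks ++ [String.ofList (PySem.List.slice s (some i) (some (i + k)))])
  else chunks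
termination_by ((s.length : Int) - i).toNat
decreasing_by omega

def split_kmers_alt (seq : String) (k : Int) : List (List String) :=
  if k ≤ 0 then [[], [], []]
  else (PySem.List.pyRange 0 3 1).map (fun offset =>
    bChunks (PySem.List.slice seq.toList (some offset) none) k 0 [])

-- ===== PRECONDITION & SPEC =====
def Spec_split_kmers (seq : String) (k : Int) (out : List (List String)) : Prop := out = split_kmers_alt seq k
instance (seq : String) (k : Int) (out : List (List String)) : Decidable (Spec_split_kmers seq k out) := by unfold Spec_split_kmers; infer_instance

-- ===== CLAIM (what is proved, stated in full; the proofs are below) =====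
def Claim_equal_split_kmers : Prop := ∀ (seq : String) (k : Int), Dom_split_kmers seq k → Spec_split_kmers seq k (split_kmers seq k)

-- ===== LEMMAS AND PROOFS =====

theorem pyGroups_nonpos (k : Int) (l : List Char) (hk : k ≤ 0) : pyGroups k l = [] := by
  unfold pyGroups
  rw [dif_neg]
  omega

theorem foldl_append_mk (l : List (List Char)) (acc : List String) :
    l.foldl (fun x kmer => x ++ [String.ofList kmer]) acc = acc ++ l.map String.ofList := by
  induction l generalizing acc with
  | nil => simp
  | cons h t ih => simp [List.foldl, ih]

theorem bChunks_eq (s : List Char) (k : Int) (hk : 0 < k) :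
    ∀ (n : Nat) (i : Int) (acc : List String), 0 ≤ i → ((s.length : Int) - i).toNat ≤ n →
      bChunks s k i acc = acc ++ (pyGroups k (s.drop i.toNat)).map String.ofList := by
  intro n
  induction n with
  | zero =>
    intro i acc hi hn
    rw [bChunks, dif_neg (by omega)]
    rw [pyGroups, dif_neg (by simp; omega)]
    simp
  | succ n ih =>
    intro i acc hi hn
    rw [bChunks]
    by_cases hc : 0 < k ∧ i + k ≤ (s.length : Int)
    · rw [dif_pos hc]
      rw [ih (i + k) _ (by omega) (by omega)]
      have hslice : PySem.List.slice s (some i) (some (i + k)) =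
          (s.drop i.toNat).take ((i + k).toNat - i.toNat) :=
        PySem.List.slice_toNat s hi (by omega)
      have hstep : pyGroups k (s.drop i.toNat) =
          (s.drop i.toNat).take k.toNat :: pyGroups k ((s.drop i.toNat).drop k.toNat) := by
        rw [pyGroups]
        rw [dif_pos ⟨hk, by simp; omega⟩]
      have hdd : (s.drop i.toNat).drop k.toNat = s.drop (i + k).toNat := by
        rw [List.drop_drop]; congr 1; omega
      rw [hstep, hdd, hslice]
      have htn : (i + k).toNat - i.toNat = k.toNat := by omega
      rw [htn]
      simp
    · rw [dif_neg hc]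
      rw [pyGroups, dif_neg (by simp; omega)]
      simp

theorem range3 : PySem.List.pyRange 0 3 1 = [0, 1, 2] := by decide

theorem bChunks_top (s : List Char) (k : Int) (hk : 0 < k) :
    bChunks s k 0 [] = (pyGroups k s).map String.ofList := by
  have h := bChunks_eq s k hk ((s.length : Int) - 0).toNat 0 [] le_rfl le_rfl
  simpa using h

theorem split_kmers_eq (seq : String) (k : Int) :
    split_kmers seq k = split_kmers_alt seq k := by
  by_cases hk : k ≤ 0
  · simp only [split_kmers, split_kmers_alt, if_pos hk,
      pyGroups_nonpos k _ hk, List.foldl, foldl_append_mk]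
    simp
  · push_neg at hk
    simp only [split_kmers, split_kmers_alt, if_neg (by omega : ¬ k ≤ 0), range3, List.map,
      PySem.List.slice_zero_start, PySem.List.slice_none_none]
    rw [bChunks_top _ k hk, bChunks_top _ k hk, bChunks_top _ k hk]
    simp only [List.foldl, foldl_append_mk, List.nil_append]
    rfl

-- ===== VERDICT (by name: the statement is the Claim_ definition above) =====
theorem split_kmers_spec : Claim_equal_split_kmers := by
  intro seq k _
  unfold Spec_split_kmers
  exact split_kmers_eq seq k
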